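-- pv_equiv track=rewrite | github.com/pierre-jezegou/kys | api/chalicelib/rekognition.py | name_in_haystack
-- ===== SOURCE A (Python) =====
-- def name_in_haystack(first_name, last_name, haystack):
--     """
--     Check if the first and last name are present in the haystack, allowing for split lines.
--
--     Args:
--         first_name (str): The first name to search for.
--         last_name (str): The last name to search for.
--         haystack (dict): A dictionary containing the haystack data.
--
--     Returns:
--         bool: True if the name is found in the haystack, False otherwise.
--     """
--     detected_lines = [text["DetectedText"] for text in haystack["TextDetections"] if text["Type"] == "LINE"]
--
--     # Check if the name components are in separate lines
--     for i in range(len(detected_lines) - 1):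
--         if (first_name in detected_lines[i] and last_name in detected_lines[i + 1]) or (last_name in detected_lines[i] and first_name in detected_lines[i + 1]):
--             return True
--
--     # Check if the name components are in the same line
--     full_name = f"{first_name} {last_name}"
--     if any(full_name in line for line in detected_lines):
--         return True
--
--     return False
-- ===== SOURCE B (Python) =====
-- def name_in_haystack(first_name, last_name, haystack):
--     lines = [t["DetectedText"] for t in haystack["TextDetections"] if t["Type"] == "LINE"]
--     # index sets: at which line numbers each name component occurs
--     first_at = {i for i, line in enumerate(lines) if first_name in line}
--     last_at = {i for i, line in enumerate(lines) if last_name in line}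
--     if any(first_name + " " + last_name in line for line in lines):
--         return True
--     # split across adjacent lines: shift one index set by one and intersect
--     return any(i + 1 in last_at for i in first_at) or any(i + 1 in first_at for i in last_at)
-- ===== Notes on version B (the rewrite author's own statement) =====
-- stated objective: alternative
-- what changed: B replaces A's early-return adjacency scan over line pairs with an index-set formulation: it builds the sets of line numbers containing each name component and decides the split-line case by shifted set membership (i in first_at and i+1 in last_at, or vice versa), after the full-name check; Pre_ excludes inputs where A raises KeyError (missing 'TextDetections'/'Type'/'DetectedText' keys), where B raises too.
import Mathlib
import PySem

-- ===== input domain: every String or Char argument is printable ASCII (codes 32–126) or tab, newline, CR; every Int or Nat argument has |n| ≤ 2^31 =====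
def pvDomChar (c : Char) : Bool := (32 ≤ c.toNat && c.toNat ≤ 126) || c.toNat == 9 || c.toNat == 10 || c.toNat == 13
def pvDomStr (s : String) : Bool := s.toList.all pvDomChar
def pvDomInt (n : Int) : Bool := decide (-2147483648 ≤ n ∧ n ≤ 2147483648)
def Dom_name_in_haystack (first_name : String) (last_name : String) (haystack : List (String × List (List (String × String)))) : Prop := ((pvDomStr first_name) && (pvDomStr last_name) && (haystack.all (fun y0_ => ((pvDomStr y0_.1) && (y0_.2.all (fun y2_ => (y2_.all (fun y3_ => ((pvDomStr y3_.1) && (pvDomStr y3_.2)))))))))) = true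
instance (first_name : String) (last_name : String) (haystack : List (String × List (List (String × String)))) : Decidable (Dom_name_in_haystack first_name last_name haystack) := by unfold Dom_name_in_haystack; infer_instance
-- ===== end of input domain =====

-- B decides the split-line case by index sets (line numbers containing each component) and shifted set
-- membership instead of A's early-return adjacency scan; alternative algorithm, same cost; return-value equivalence.

-- ===== PORT A =====
-- the 'for i in range(len(detected_lines) - 1)' loop with its early return
def aScan (first_name last_name : String) : List String → Bool
  | a :: b :: rest =>
      if (PySem.Str.isIn first_name a && PySem.Str.isIn last_name b)
         || (PySem.Str.isIn last_name a && PySem.Str.isIn first_name b) then true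
      else aScan first_name last_name (b :: rest)
  | _ => false

def name_in_haystack (first_name : String) (last_name : String) (haystack : List (String × List (List (String × String)))) : Bool :=
  let detected_lines :=
    (((PySem.Dict.mk haystack).get? "TextDetections").getD []
      |>.filter (fun t => (PySem.Dict.mk t).getD "Type" "" == "LINE")).map
      (fun t => (PySem.Dict.mk t).getD "DetectedText" "")
  if aScan first_name last_name detected_lines then true
  else
    let full_name := first_name ++ " " ++ last_name
    if detected_lines.any (fun line => PySem.Str.isIn full_name line) then true
    else false

-- ===== PORT B =====
-- {i for i, line in enumerate(lines) if p(line)}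
def idxSet (p : String → Bool) (lines : List String) : PySem.Set Int :=
  PySem.Set.ofList ((PySem.List.enumerate lines 0).filterMap
    (fun q => if p q.2 then some q.1 else none))

def name_in_haystack_alt (first_name : String) (last_name : String) (haystack : List (String × List (List (String × String)))) : Bool :=
  let lines :=
    (((PySem.Dict.mk haystack).get? "TextDetections").getD []
      |>.filter (fun t => (PySem.Dict.mk t).getD "Type" "" == "LINE")).map
      (fun t => (PySem.Dict.mk t).getD "DetectedText" "")
  let first_at := idxSet (fun line => PySem.Str.isIn first_name line) lines
  let last_at := idxSet (fun line => PySem.Str.isIn last_name line) lines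
  if lines.any (fun line => PySem.Str.isIn (first_name ++ " " ++ last_name) line) then true
  else
    (first_at.any (fun i => PySem.Set.contains last_at (i + 1)))
      || (last_at.any (fun i => PySem.Set.contains first_at (i + 1)))

-- ===== PRECONDITION & SPEC =====
-- Pre_ excludes exactly the inputs where Python A raises KeyError: no "TextDetections" key,
-- a detection without "Type", or a LINE detection without "DetectedText".
def Pre_name_in_haystack (first_name : String) (last_name : String) (haystack : List (String × List (List (String × String)))) : Prop :=
  (PySem.Dict.mk haystack).contains "TextDetections" = true ∧
  ∀ t ∈ (((PySem.Dict.mk haystack).get? "TextDetections").getD []),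
    (PySem.Dict.mk t).contains "Type" = true ∧
    ((PySem.Dict.mk t).get? "Type" = some "LINE" → (PySem.Dict.mk t).contains "DetectedText" = true)
instance (first_name : String) (last_name : String) (haystack : List (String × List (List (String × String)))) : Decidable (Pre_name_in_haystack first_name last_name haystack) := by unfold Pre_name_in_haystack; infer_instance

def pvWitness_name_in_haystack : String × String × (List (String × List (List (String × String)))) :=
  ("John", "Smith", [("TextDetections", [[("Type", "LINE"), ("DetectedText", "John")], [("Type", "LINE"), ("DetectedText", "Smith")]])])

def Spec_name_in_haystack (first_name : String) (last_name : String) (haystack : List (String × List (List (String × String)))) (out : Bool) : Prop := out = name_in_haystack_alt first_name last_name haystack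
instance (first_name : String) (last_name : String) (haystack : List (String × List (List (String × String)))) (out : Bool) : Decidable (Spec_name_in_haystack first_name last_name haystack out) := by unfold Spec_name_in_haystack; infer_instance

-- ===== CLAIM (what is proved, stated in full; the proofs are below) =====
def Claim_equal_name_in_haystack : Prop := ∀ (first_name : String) (last_name : String) (haystack : List (String × List (List (String × String)))), Dom_name_in_haystack first_name last_name haystack → Pre_name_in_haystack first_name last_name haystack → Spec_name_in_haystack first_name last_name haystack (name_in_haystack first_name last_name haystack)

-- ===== LEMMAS AND PROOFS =====

-- one direction of the split-line condition: f at some line, l at the next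
def adjOne (f l : String → Bool) (ls : List String) : Prop :=
  ∃ (k : Nat) (a b : String), ls[k]? = some a ∧ ls[k+1]? = some b ∧ f a = true ∧ l b = true

theorem aScan_iff (fn ln : String) : ∀ ls : List String,
    aScan fn ln ls = true ↔
      adjOne (PySem.Str.isIn fn) (PySem.Str.isIn ln) ls ∨ adjOne (PySem.Str.isIn ln) (PySem.Str.isIn fn) ls
  | [] => by
      simp [aScan, adjOne]
  | [a] => by
      simp [aScan, adjOne]
  | a :: b :: rest => by
      rw [aScan]
      by_cases h : ((PySem.Str.isIn fn a && PySem.Str.isIn ln b)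
          || (PySem.Str.isIn ln a && PySem.Str.isIn fn b)) = true
      · simp only [h, if_true, true_iff]
        simp only [Bool.or_eq_true, Bool.and_eq_true] at h
        rcases h with h' | h'
        · exact Or.inl ⟨0, a, b, rfl, rfl, h'.1, h'.2⟩
        · exact Or.inr ⟨0, a, b, rfl, rfl, h'.1, h'.2⟩
      · simp only [h, Bool.false_eq_true, if_false]
        rw [aScan_iff fn ln (b :: rest)]
        constructor
        · rintro (⟨k, x, y, hx, hy, hf, hl⟩ | ⟨k, x, y, hx, hy, hf, hl⟩)
          · exact Or.inl ⟨k + 1, x, y, hx, hy, hf, hl⟩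
          · exact Or.inr ⟨k + 1, x, y, hx, hy, hf, hl⟩
        · rintro (⟨k, x, y, hx, hy, hf, hl⟩ | ⟨k, x, y, hx, hy, hf, hl⟩)
          · cases k with
            | zero =>
                simp only [List.getElem?_cons_zero, Option.some.injEq] at hx
                simp only [List.getElem?_cons_succ, List.getElem?_cons_zero, Option.some.injEq] at hy
                subst hx; subst hy
                exact absurd (by rw [hf, hl]; simp) h
            | succ k => exact Or.inl ⟨k, x, y, hx, hy, hf, hl⟩
          · cases k with
            | zero =>
                simp only [List.getElem?_cons_zero, Option.some.injEq] at hx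
                simp only [List.getElem?_cons_succ, List.getElem?_cons_zero, Option.some.injEq] at hy
                subst hx; subst hy
                exact absurd (by rw [hf, hl]; simp) h
            | succ k => exact Or.inr ⟨k, x, y, hx, hy, hf, hl⟩

theorem mem_idxSet (p : String → Bool) (ls : List String) (i : Int) :
    i ∈ idxSet p ls ↔ ∃ (k : Nat) (x : String), ls[k]? = some x ∧ p x = true ∧ i = (k : Int) := by
  rw [idxSet, PySem.Set.mem_ofList, List.mem_filterMap]
  constructor
  · rintro ⟨⟨j, x⟩, hmem, hval⟩
    rcases (PySem.List.mem_enumerate_iff _ _ _).mp hmem with ⟨k, hk, hpair⟩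
    simp only [Prod.mk.injEq] at hpair
    by_cases hp : p x = true
    · refine ⟨k, x, ?_, hp, ?_⟩
      · rw [List.getElem?_eq_getElem hk]; exact congrArg some hpair.2.symm
      · simp only [hp, if_true, Option.some.injEq] at hval
        omega
    · simp [hp] at hval
  · rintro ⟨k, x, hx, hp, hi⟩
    have hk : k < ls.length := (List.getElem?_eq_some_iff.mp hx).1
    refine ⟨((k : Int), x), ?_, by simp [hp, hi]⟩
    refine (PySem.List.mem_enumerate_iff _ _ _).mpr ⟨k, hk, ?_⟩
    have : ls[k] = x := (List.getElem?_eq_some_iff.mp hx).2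
    simp [this]

theorem shiftMem_iff (f l : String → Bool) (ls : List String) :
    ((idxSet f ls).any (fun i => PySem.Set.contains (idxSet l ls) (i + 1))) = true
      ↔ adjOne f l ls := by
  rw [List.any_eq_true]
  constructor
  · rintro ⟨i, hi, hc⟩
    rcases (mem_idxSet f ls i).mp hi with ⟨k1, a, ha, hf, hieq⟩
    have hmem : i + 1 ∈ idxSet l ls := (PySem.Set.contains_iff _ _).mp hc
    rcases (mem_idxSet l ls (i + 1)).mp hmem with ⟨k2, b, hb, hl, hi2⟩
    have hk : k2 = k1 + 1 := by omega
    subst hk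
    exact ⟨k1, a, b, ha, hb, hf, hl⟩
  · rintro ⟨k, a, b, ha, hb, hf, hl⟩
    refine ⟨(k : Int), (mem_idxSet f ls _).mpr ⟨k, a, ha, hf, rfl⟩, ?_⟩
    exact (PySem.Set.contains_iff _ _).mpr ((mem_idxSet l ls _).mpr ⟨k + 1, b, hb, hl, by push_cast; ring⟩)

theorem aScan_eq_shift (fn ln : String) (ls : List String) :
    aScan fn ln ls =
      (((idxSet (fun line => PySem.Str.isIn fn line) ls).any
          (fun i => PySem.Set.contains (idxSet (fun line => PySem.Str.isIn ln line) ls) (i + 1)))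
        || ((idxSet (fun line => PySem.Str.isIn ln line) ls).any
          (fun i => PySem.Set.contains (idxSet (fun line => PySem.Str.isIn fn line) ls) (i + 1)))) := by
  rw [Bool.eq_iff_iff, aScan_iff, Bool.or_eq_true, shiftMem_iff, shiftMem_iff]

-- ===== VERDICT (by name: the statement is the Claim_ definition above) =====
theorem name_in_haystack_spec : Claim_equal_name_in_haystack := by
  intro fn ln hs _ _
  show name_in_haystack fn ln hs = name_in_haystack_alt fn ln hs
  simp only [name_in_haystack, name_in_haystack_alt, aScan_eq_shift]
  generalize List.any _ _ = y
  generalize ((_ : Bool) || _) = x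
  cases x <;> cases y <;> simp
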